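-- pv_equiv track=rewrite | github.com/ChiuYeeJay/Reharmonizer_web | harmonizer.py | considering_8th_note
-- ===== SOURCE A (Python) =====
-- def considering_8th_note(note_list: list, index: int, cur: list):
--     result = []
--     for pitch_num in [note_list[index], note_list[index]+12]:
--         cur.append(pitch_num)
--         if index == 4:
--             temp = cur.copy()
--             temp.sort()
--             if temp[0] == note_list[0] or temp[0] == note_list[0]+12:
--                 result.append(temp)
--         else:
--             result.extend(considering_8th_note(note_list, index+1, cur))
--         cur.pop()
--     return result
-- ===== SOURCE B (Python) =====
-- def considering_8th_note(note_list: list, index: int, cur: list):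
--     base = note_list[0]
--     combos = [[]]
--     i = index
--     while True:
--         lo = note_list[i]
--         combos = [c + [p] for c in combos for p in (lo, lo + 12)]
--         if i == 4:
--             break
--         i += 1
--     result = []
--     for combo in combos:
--         temp = sorted(cur + combo)
--         if temp[0] == base or temp[0] == base + 12:
--             result.append(temp)
--     return result
-- ===== Notes on version B (the rewrite author's own statement) =====
-- stated objective: alternative
-- what changed: Replaces A's DFS recursion (with temporary in-place mutation of cur) with an iterative Cartesian-product enumeration: the octave choices for indices index..4 are built up as an explicit combo list and then filtered in one pass; lexicographic product order reproduces A's DFS output order, and cur is never mutated.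
import Mathlib
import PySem

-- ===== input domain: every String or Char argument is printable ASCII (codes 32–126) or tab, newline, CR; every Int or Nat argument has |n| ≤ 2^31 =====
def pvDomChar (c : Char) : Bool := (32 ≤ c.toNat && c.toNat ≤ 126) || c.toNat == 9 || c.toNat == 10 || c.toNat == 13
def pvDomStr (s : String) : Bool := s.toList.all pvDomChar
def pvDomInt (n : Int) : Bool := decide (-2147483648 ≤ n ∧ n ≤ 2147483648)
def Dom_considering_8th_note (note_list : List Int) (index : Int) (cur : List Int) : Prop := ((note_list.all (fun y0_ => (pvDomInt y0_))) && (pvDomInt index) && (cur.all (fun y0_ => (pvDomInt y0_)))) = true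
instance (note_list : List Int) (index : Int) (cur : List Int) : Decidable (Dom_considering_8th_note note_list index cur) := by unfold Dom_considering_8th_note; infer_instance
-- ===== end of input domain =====

-- B replaces A's DFS recursion by iterative Cartesian enumeration of the octave choices,
-- then filters the sorted combinations in one pass (alternative decomposition, same cost).
-- A temporarily mutates `cur` (append/pop, net unchanged on return); B never mutates it;
-- the equivalence proved here is about the return value.

-- ===== PORT A =====
-- Fuel-indexed transliteration of A's recursion; fuel (5 - index).toNat bounds the
-- recursion depth exactly on the inputs where the Python returns (index ≤ 4).
-- `none` results of pyGet? mark Python IndexError; those inputs are outside Pre_.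
def c8Aux (note_list : List Int) : Nat → Int → List Int → List (List Int)
  | 0, _, _ => []
  | n + 1, index, cur =>
    match PySem.List.pyGet? note_list index with
    | none => []  -- IndexError (outside Pre_)
    | some v =>
      [v, v + 12].foldl (fun result pitch_num =>
        let cur' := cur ++ [pitch_num]
        if index = 4 then
          let temp := PySem.List.sorted cur' (fun x => x) false
          match PySem.List.pyGet? temp 0, PySem.List.pyGet? note_list 0 with
          | some t0, some b0 =>
            if t0 = b0 ∨ t0 = b0 + 12 then result ++ [temp] else result
          | _, _ => result  -- IndexError (outside Pre_)
        else
          result ++ c8Aux note_list n (index + 1) cur') []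

def considering_8th_note (note_list : List Int) (index : Int) (cur : List Int) : List (List Int) :=
  c8Aux note_list (5 - index).toNat index cur

-- ===== PORT B =====
-- The while-True loop of Source B, fuel-indexed like port A's recursion; fuel exhaustion /
-- `none` from pyGet? mark Python IndexError (outside Pre_).
def c8AltLoop (note_list : List Int) : Nat → Int → List (List Int) → List (List Int)
  | 0, _, _ => []  -- IndexError region (outside Pre_)
  | n + 1, i, combos =>
    match PySem.List.pyGet? note_list i with
    | none => []  -- IndexError (outside Pre_)
    | some lo =>
      let combos := combos.flatMap (fun c => [c ++ [lo], c ++ [lo + 12]])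
      if i = 4 then combos else c8AltLoop note_list n (i + 1) combos

def considering_8th_note_alt (note_list : List Int) (index : Int) (cur : List Int) : List (List Int) :=
  match PySem.List.pyGet? note_list 0 with
  | none => []  -- IndexError (outside Pre_)
  | some base =>
    let combos := c8AltLoop note_list (5 - index).toNat index [[]]
    combos.foldl (fun result combo =>
        let temp := PySem.List.sorted (cur ++ combo) (fun x => x) false
        match PySem.List.pyGet? temp 0 with
        | none => result  -- IndexError (outside Pre_)
        | some t0 =>
          if t0 = base ∨ t0 = base + 12 then result ++ [temp] else result) []

-- ===== PRECONDITION & SPEC =====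
-- Exactly the inputs on which the Python A returns normally: it reads note_list[index..4]
-- and note_list[0], so it raises IndexError unless -len ≤ index ≤ 4 and len ≥ 5
-- (for index > 4 the recursion runs off the end of the list).
def Pre_considering_8th_note (note_list : List Int) (index : Int) (_cur : List Int) : Prop :=
  5 ≤ note_list.length ∧ -(note_list.length : Int) ≤ index ∧ index ≤ 4
instance (note_list : List Int) (index : Int) (cur : List Int) : Decidable (Pre_considering_8th_note note_list index cur) := by unfold Pre_considering_8th_note; infer_instance

def pvWitness_considering_8th_note : List Int × Int × List Int := ([0, 2, 4, 5, 7], 0, [])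

def Spec_considering_8th_note (note_list : List Int) (index : Int) (cur : List Int) (out : List (List Int)) : Prop := out = considering_8th_note_alt note_list index cur
instance (note_list : List Int) (index : Int) (cur : List Int) (out : List (List Int)) : Decidable (Spec_considering_8th_note note_list index cur out) := by unfold Spec_considering_8th_note; infer_instance

-- ===== CLAIM (what is proved, stated in full; the proofs are below) =====
def Claim_equal_considering_8th_note : Prop := ∀ (note_list : List Int) (index : Int) (cur : List Int), Dom_considering_8th_note note_list index cur → Pre_considering_8th_note note_list index cur → Spec_considering_8th_note note_list index cur (considering_8th_note note_list index cur)

-- ===== LEMMAS AND PROOFS =====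

-- the combo-building step of B
def c8Step (note_list : List Int) (cs : List (List Int)) (i : Int) : List (List Int) :=
  match PySem.List.pyGet? note_list i with
  | none => cs
  | some lo => cs.flatMap (fun c => [c ++ [lo], c ++ [lo + 12]])

-- per-index choice list
def c8H (note_list : List Int) (i : Int) (c : List Int) : List (List Int) :=
  match PySem.List.pyGet? note_list i with
  | none => [c]
  | some lo => [c ++ [lo], c ++ [lo + 12]]

-- the filtering pass of B, as a flatMap body
def c8G (base : Int) (cur combo : List Int) : List (List Int) :=
  let temp := PySem.List.sorted (cur ++ combo) (fun x => x) false
  match PySem.List.pyGet? temp 0 with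
  | none => []
  | some t0 => if t0 = base ∨ t0 = base + 12 then [temp] else []

theorem c8Step_eq (note_list : List Int) (cs : List (List Int)) (i : Int) :
    c8Step note_list cs i = cs.flatMap (c8H note_list i) := by
  unfold c8Step c8H
  cases PySem.List.pyGet? note_list i <;> simp

-- distribution of the product foldl over its accumulator
theorem c8_foldl_step (note_list : List Int) (l : List Int) :
    ∀ cs : List (List Int),
      l.foldl (c8Step note_list) cs
        = cs.flatMap (fun c => (l.foldl (c8Step note_list) [[]]).map (c ++ ·)) := by
  induction l with
  | nil => intro cs; simp
  | cons i l ih =>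
    intro cs
    simp only [List.foldl_cons]
    rw [ih (c8Step note_list cs i), ih (c8Step note_list [[]] i)]
    cases h : PySem.List.pyGet? note_list i with
    | none => simp [c8Step, h]
    | some lo =>
      simp [c8Step, h, List.flatMap_assoc, List.map_append, List.map_map,
            Function.comp_def, List.append_assoc]

-- B's filter foldl as a flatMap
theorem c8_filt_eq (base : Int) (cur : List Int) (combos : List (List Int)) :
    combos.foldl (fun result combo =>
        match PySem.List.pyGet? (PySem.List.sorted (cur ++ combo) (fun x => x) false) 0 with
        | none => result
        | some t0 =>
          if t0 = base ∨ t0 = base + 12 then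
            result ++ [PySem.List.sorted (cur ++ combo) (fun x => x) false]
          else result) []
      = combos.flatMap (c8G base cur) := by
  have hbody : (fun (result : List (List Int)) (combo : List Int) =>
      match PySem.List.pyGet? (PySem.List.sorted (cur ++ combo) (fun x => x) false) 0 with
      | none => result
      | some t0 =>
        if t0 = base ∨ t0 = base + 12 then
          result ++ [PySem.List.sorted (cur ++ combo) (fun x => x) false]
        else result)
      = fun result combo => result ++ c8G base cur combo := by
    funext result combo
    cases h : PySem.List.pyGet? (PySem.List.sorted (cur ++ combo) (fun x => x) false) 0 with
    | none => simp [c8G, h]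
    | some t0 =>
      simp only [c8G, h]
      split_ifs <;> simp
  rw [hbody, PySem.List.foldl_append_eq_flatMap]
  simp

-- Source B's while loop computes the same product as a foldl over range(index, 5)
theorem c8AltLoop_eq (note_list : List Int) :
    ∀ (n : Nat) (i : Int) (combos : List (List Int)),
      -(note_list.length : Int) ≤ i → i ≤ 4 → 5 ≤ note_list.length →
      n = (5 - i).toNat →
      c8AltLoop note_list n i combos
        = (PySem.List.pyRange i 5 1).foldl (c8Step note_list) combos := by
  intro n
  induction n with
  | zero => intro i combos h1 h2 h3 h4; exfalso; omega
  | succ n ih =>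
    intro i combos h1 h2 h3 h4
    obtain ⟨lo, hlo⟩ : ∃ lo, PySem.List.pyGet? note_list i = some lo := by
      cases h : PySem.List.pyGet? note_list i with
      | none =>
        exact absurd (by unfold PySem.Raise.InRange; omega)
          ((PySem.List.pyGet?_eq_none_iff note_list i).mp h)
      | some lo => exact ⟨lo, rfl⟩
    have hrange : PySem.List.pyRange i 5 1 = i :: PySem.List.pyRange (i + 1) 5 1 :=
      PySem.List.pyRange_one_cons (by omega)
    rw [hrange]
    simp only [c8AltLoop, hlo, List.foldl_cons]
    by_cases h5 : i = 4
    · subst h5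
      rw [PySem.List.pyRange_one_eq_nil (by omega)]
      simp [c8Step, hlo]
    · rw [if_neg h5, ih (i + 1) _ (by omega) (by omega) h3 (by omega)]
      simp [c8Step, hlo]

-- main invariant: the fueled DFS equals filter-over-product
theorem c8_main (note_list : List Int) (base : Int)
    (hb : PySem.List.pyGet? note_list 0 = some base)
    (hlen : 5 ≤ note_list.length) :
    ∀ (n : Nat) (index : Int) (cur : List Int),
      -(note_list.length : Int) ≤ index → index ≤ 4 → n = (5 - index).toNat →
      c8Aux note_list n index cur
        = ((PySem.List.pyRange index 5 1).foldl (c8Step note_list) [[]]).flatMap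
            (c8G base cur) := by
  intro n
  induction n with
  | zero =>
    intro index cur h1 h2 h3
    exfalso; omega
  | succ n ih =>
    intro index cur h1 h2 h3
    have hidx : PySem.Raise.InRange note_list.length index := by
      unfold PySem.Raise.InRange; omega
    obtain ⟨v, hv⟩ : ∃ v, PySem.List.pyGet? note_list index = some v := by
      cases h : PySem.List.pyGet? note_list index with
      | none => exact absurd hidx ((PySem.List.pyGet?_eq_none_iff note_list index).mp h)
      | some v => exact ⟨v, rfl⟩
    by_cases h4 : index = 4
    · subst h4
      have hrange : PySem.List.pyRange 4 5 1 = [4] := PySem.List.pyRange_one_singleton 4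
      simp only [c8Aux, hv, List.foldl_cons, List.foldl_nil]
      rw [hrange]
      simp only [List.foldl_cons, List.foldl_nil]
      rw [c8Step_eq]
      simp only [c8H, hv, List.flatMap_cons, List.flatMap_nil, List.append_nil,
                 List.nil_append]
      cases h1 : PySem.List.pyGet? (PySem.List.sorted (cur ++ [v]) (fun x => x) false) 0 <;>
        cases h2 : PySem.List.pyGet? (PySem.List.sorted (cur ++ [v + 12]) (fun x => x) false) 0 <;>
        simp only [c8G, h1, h2, hb, if_pos, List.nil_append] <;>
        split_ifs <;> simp_all
    · have h5 : index < 4 := lt_of_le_of_ne h2 h4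
      have hrange : PySem.List.pyRange index 5 1 = index :: PySem.List.pyRange (index + 1) 5 1 :=
        PySem.List.pyRange_one_cons (by omega)
      have hn : n = (5 - (index + 1)).toNat := by omega
      have ih1 := ih (index + 1) (cur ++ [v]) (by omega) (by omega) hn
      have ih2 := ih (index + 1) (cur ++ [v + 12]) (by omega) (by omega) hn
      simp only [c8Aux, hv, List.foldl_cons, List.foldl_nil, if_neg h4]
      rw [ih1, ih2, hrange]
      simp only [List.foldl_cons]
      rw [c8Step_eq, c8_foldl_step]
      simp only [c8H, hv, List.flatMap_cons, List.flatMap_nil, List.append_nil, List.nil_append,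
                 List.flatMap_map]
      have e1 : ∀ r : List Int, c8G base cur (v :: r) = c8G base (cur ++ [v]) r := fun r => by
        simp [c8G, List.append_assoc]
      have e2 : ∀ r : List Int, c8G base cur ((v + 12) :: r) = c8G base (cur ++ [v + 12]) r :=
        fun r => by simp [c8G, List.append_assoc]
      rw [c8_foldl_step note_list (PySem.List.pyRange (index + 1) 5 1) [[v], [v + 12]]]
      simp only [List.flatMap_cons, List.flatMap_nil, List.append_nil, List.flatMap_append,
                 List.flatMap_map]
      simp [e1, e2]

-- ===== VERDICT (by name: the statement is the Claim_ definition above) =====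
theorem considering_8th_note_spec : Claim_equal_considering_8th_note := by
  intro note_list index cur hdom hpre
  obtain ⟨hlen, hlo, hhi⟩ := hpre
  obtain ⟨base, hb⟩ : ∃ b, PySem.List.pyGet? note_list 0 = some b := by
    cases h : PySem.List.pyGet? note_list 0 with
    | none =>
      exact absurd (by unfold PySem.Raise.InRange; omega) ((PySem.List.pyGet?_eq_none_iff note_list 0).mp h)
    | some b => exact ⟨b, rfl⟩
  show considering_8th_note note_list index cur = considering_8th_note_alt note_list index cur
  unfold considering_8th_note considering_8th_note_alt
  simp only [hb]
  rw [c8AltLoop_eq note_list (5 - index).toNat index [[]] hlo hhi hlen rfl,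
      c8_filt_eq base cur]
  exact c8_main note_list base hb hlen (5 - index).toNat index cur hlo hhi rfl
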